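-- pv_equiv track=rewrite | github.com/cksquf98/practice | 프로그래머스/3/150367. 표현 가능한 이진트리/표현 가능한 이진트리.py | solution
-- ===== SOURCE A (Python) =====
-- def search(number):
--     length = len(number)  # 이진수 문자열의 길이를 구함
--     # 길이가 1이거나, 문자열에 '1'이 없거나, '0'이 없으면 True 반환
--     if length == 1 or '1' not in number or '0' not in number:
--         return True  # 기저 사례: 길이가 1이거나, 모두 0 또는 모두 1인 경우는 유효함
--
--     mid = length // 2  # 문자열의 중간 인덱스를 계산
--     # 중간 위치의 값이 '0'인 경우 False 반환
--     if number[mid] == '0':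
--         return False  # 중간 값이 0이면 조건을 만족하지 않음
--
--     # 재귀적으로 왼쪽 및 오른쪽 부분 문자열을 검사하여 둘 다 True인 경우에만 True 반환
--     return search(number[:mid]) and search(number[mid + 1:])
--
-- def solution(numbers):
--     # 주어진 숫자들을 이진수 문자열로 변환하고, '0b' 접두사를 제거
--     bin_numbers = [bin(x)[2:] for x in numbers]
--     # 최대 길이를 기준으로 (0부터 49까지) 각 이진수 문자열의 최대 길이 -1 값을 포함하는 리스트를 생성
--     bin_list = [2**x - 1 for x in range(50)]
--     answer = []  # 결과를 저장할 리스트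
--
--     # 각 이진수 문자열에 대해
--     for number in bin_numbers:
--         length = len(number)  # 현재 이진수 문자열의 길이
--
--         # 길이를 맞추기 위해 0으로 패딩할 최대 길이를 결정
--         for num in bin_list:
--             if num >= length:
--                 number = '0' * (num - length) + number  # 왼쪽에 0을 추가하여 길이를 맞춤
--                 break  # 조건에 맞는 길이를 찾으면 반복 종료
--
--         # search 함수를 사용하여 유효성 검사, 유효하면 1, 그렇지 않으면 0을 추가
--         answer.append(1 if search(number) else 0)
--
--     return answer  # 최종 결과 리스트 반환
-- ===== SOURCE B (Python) =====
-- def solution(numbers):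
--     res = []
--     for x in numbers:
--         s = bin(x)[2:]
--         full = 1
--         while full < len(s):
--             full = 2 * full + 1
--         s = '0' * (full - len(s)) + s
--         ok = 1
--         stack = [(s, False)]
--         while stack:
--             u, anc0 = stack.pop()
--             if not u:
--                 continue
--             mid = len(u) // 2
--             if anc0 and u[mid] == '1':
--                 ok = 0
--                 break
--             nxt = anc0 or u[mid] == '0'
--             stack.append((u[mid + 1:], nxt))
--             stack.append((u[:mid], nxt))
--         res.append(ok)
--     return res
-- ===== Notes on version B (the rewrite author's own statement) =====
-- stated objective: alternative
-- what changed: A's recursive divide-and-conquer search (per-call '1'/'0' substring membership tests, then recurse on both halves) is replaced by an explicit-stack DFS that propagates an ancestor-zero flag and fails on the first '1' seen under a '0'; the precomputed 2^x-1 table scan for the padding length is replaced by a doubling loop.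
import Mathlib
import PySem

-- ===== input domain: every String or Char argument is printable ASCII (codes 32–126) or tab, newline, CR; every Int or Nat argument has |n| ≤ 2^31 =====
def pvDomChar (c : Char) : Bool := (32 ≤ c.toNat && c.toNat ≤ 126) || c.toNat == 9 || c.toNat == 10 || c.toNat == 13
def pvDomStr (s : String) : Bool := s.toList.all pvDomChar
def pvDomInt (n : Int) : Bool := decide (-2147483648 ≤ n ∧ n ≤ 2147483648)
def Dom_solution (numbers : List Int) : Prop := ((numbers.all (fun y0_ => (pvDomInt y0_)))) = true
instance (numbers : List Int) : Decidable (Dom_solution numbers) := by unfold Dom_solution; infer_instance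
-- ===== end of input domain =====

-- B replaces A's recursive divide-and-conquer (with per-call '1' in / '0' in substring scans)
-- by an explicit-stack DFS propagating an ancestor-zero flag, and A's precomputed 2^x-1 table
-- by a doubling loop; objective: alternative (same cost class), return value only.

-- ===== PORT A =====
-- bin(x)[2:] : binary digits; for negative x Python gives '-0b…' so [2:] keeps a leading 'b'.
def natBin (n : Nat) : List Char :=
  if n = 0 then [] else natBin (n / 2) ++ [if n % 2 == 1 then '1' else '0']
termination_by n
decreasing_by omega

def binDigits (n : Nat) : List Char := if n = 0 then ['0'] else natBin n

def pyBin (x : Int) : List Char :=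
  if x < 0 then 'b' :: binDigits (-x).toNat else binDigits x.toNat

-- A's inner 'for num in bin_list: if num >= length: pad; break'
def padScan (bl : List Nat) (number : List Char) : List Char :=
  match bl with
  | [] => number
  | num :: rest =>
      if number.length ≤ num then List.replicate (num - number.length) '0' ++ number
      else padScan rest number

-- A's recursive search; number[mid] is in range whenever read (length ≥ 2 there), so getD ' ' is unreachable
def search (number : List Char) : Bool :=
  if number.length == 1 || !(number.contains '1') || !(number.contains '0') then true
  else
    -- mid = length // 2; number[mid] is in range whenever read (length ≥ 2 there), so getD ' ' is unreachable
    if (PySem.List.pyGet? number ((number.length / 2 : Nat) : Int)).getD ' ' == '0' then false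
    else
      search (PySem.List.slice number none (some ((number.length / 2 : Nat) : Int))) &&
      search (PySem.List.slice number (some ((number.length / 2 + 1 : Nat) : Int)) none)
termination_by number.length
decreasing_by
  all_goals
    rename_i h _
    simp only [Bool.or_eq_true, Bool.not_eq_eq_eq_not, Bool.not_true, not_or,
      Bool.not_eq_false] at h
    obtain ⟨⟨-, h1⟩, -⟩ := h
    have hne : number ≠ [] := by intro hE; rw [hE] at h1; simp at h1
    have hpos : 0 < number.length := List.length_pos_iff.mpr hne
    simp only [PySem.List.slice_to_natCast, PySem.List.slice_from_natCast,
      List.length_take, List.length_drop]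
    omega

def solution (numbers : List Int) : List Int :=
  let bin_numbers := numbers.map (fun x => pyBin x)
  let bin_list := (List.range 50).map (fun x => 2 ^ x - 1)
  bin_numbers.foldl
    (fun answer number =>
      answer ++ [if search (padScan bin_list number) then 1 else 0]) []

-- ===== PORT B =====
-- 'full = 1; while full < len: full = 2*full + 1'
def fullLen (full L : Nat) : Nat :=
  if full < L then fullLen (2 * full + 1) L else full
termination_by L - full
decreasing_by omega

-- the explicit-stack DFS: pop (u, anc0); empty → continue; a '1' under a zero ancestor → 0; else push halves
def dfsLoop (stack : List (List Char × Bool)) : Bool :=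
  match stack with
  | [] => true
  | (u, anc0) :: st =>
      if u.length = 0 then dfsLoop st
      else
        let c := (PySem.List.pyGet? u ((u.length / 2 : Nat) : Int)).getD ' '   -- u[mid], in range: mid < u.length
        if anc0 && (c == '1') then false
        else
          let nxt := anc0 || (c == '0')
          dfsLoop ((PySem.List.slice u none (some ((u.length / 2 : Nat) : Int)), nxt) ::
                   (PySem.List.slice u (some ((u.length / 2 + 1 : Nat) : Int)) none, nxt) :: st)
termination_by (stack.map (fun e => 2 * e.1.length + 1)).sum
decreasing_by
  all_goals
    simp only [PySem.List.slice_to_natCast, PySem.List.slice_from_natCast,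
      List.map_cons, List.sum_cons, List.length_take, List.length_drop]
    omega

def solution_alt (numbers : List Int) : List Int :=
  numbers.foldl
    (fun res x =>
      let s := pyBin x
      let full := fullLen 1 s.length
      let t := List.replicate (full - s.length) '0' ++ s
      res ++ [if dfsLoop [(t, false)] then 1 else 0]) []

-- ===== PRECONDITION & SPEC =====
def Spec_solution (numbers : List Int) (out : List Int) : Prop := out = solution_alt numbers
instance (numbers : List Int) (out : List Int) : Decidable (Spec_solution numbers out) := by unfold Spec_solution; infer_instance

-- ===== CLAIM (what is proved, stated in full; the proofs are below) =====
def Claim_equal_solution : Prop := ∀ (numbers : List Int), Dom_solution numbers → Spec_solution numbers (solution numbers)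

-- ===== LEMMAS AND PROOFS =====

-- recursive form of the stack DFS, used only by the proofs
def dfsAux (u : List Char) (b : Bool) : Bool :=
  if u.length = 0 then true
  else
    let c := u.getD (u.length / 2) ' '
    if b && (c == '1') then false
    else dfsAux (u.take (u.length / 2)) (b || (c == '0')) &&
         dfsAux (u.drop (u.length / 2 + 1)) (b || (c == '0'))
termination_by u.length
decreasing_by
  · simp; omega
  · simp; omega

theorem pyGetD_nat (u : List Char) (n : Nat) (d : Char) :
    (PySem.List.pyGet? u (n : Int)).getD d = u.getD n d := by
  simp [PySem.List.pyGet?_natCast, List.getD_eq_getElem?_getD]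

theorem dfsLoop_cons : ∀ (n : Nat) (u : List Char), u.length ≤ n →
    ∀ (b : Bool) (st : List (List Char × Bool)),
    dfsLoop ((u, b) :: st) = (dfsAux u b && dfsLoop st) := by
  intro n
  induction n with
  | zero =>
    intro u hu b st
    have hu0 : u = [] := by cases u <;> simp_all
    subst hu0
    simp [dfsLoop, dfsAux]
  | succ n ih =>
    intro u hu b st
    by_cases h0 : u.length = 0
    · have hu0 : u = [] := by cases u <;> simp_all
      subst hu0
      simp [dfsLoop, dfsAux]
    · rw [dfsLoop, dfsAux]
      rw [if_neg h0, if_neg h0]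
      simp only [PySem.List.slice_to_natCast, PySem.List.slice_from_natCast, pyGetD_nat]
      split
      · simp
      · rw [ih (u.take (u.length / 2)) (by simp; omega),
            ih (u.drop (u.length / 2 + 1)) (by simp; omega),
            Bool.and_assoc]

-- splitting u at its middle element
theorem mem_middle_split (u : List Char) (h : u.length ≠ 0) (a : Char) :
    (a ∈ u ↔ a ∈ u.take (u.length / 2) ∨ a = u[u.length / 2]'(by omega) ∨
      a ∈ u.drop (u.length / 2 + 1)) := by
  conv_lhs => rw [← List.take_append_drop (u.length / 2) u]
  rw [List.drop_eq_getElem_cons (by omega)]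
  simp only [List.mem_append, List.mem_cons]

theorem dfsAux_true : ∀ (n : Nat) (u : List Char), u.length ≤ n →
    dfsAux u true = !u.contains '1' := by
  intro n
  induction n with
  | zero =>
    intro u hu
    have hu0 : u = [] := by cases u <;> simp_all
    subst hu0
    simp [dfsAux]
  | succ n ih =>
    intro u hu
    by_cases h0 : u.length = 0
    · have hu0 : u = [] := by cases u <;> simp_all
      subst hu0
      simp [dfsAux]
    · rw [dfsAux, if_neg h0]
      have hlt : u.length / 2 < u.length := by omega
      have hgd : u.getD (u.length / 2) ' ' = u[u.length / 2] := by
        rw [List.getD_eq_getElem?_getD, List.getElem?_eq_getElem hlt, Option.getD_some]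
      have hsplit := mem_middle_split u h0 '1'
      by_cases hc : u[u.length / 2]'hlt = '1'
      · have h1 : u.contains '1' = true := by
          simp only [List.contains_iff_mem, decide_eq_true_eq]
          exact hsplit.mpr (Or.inr (Or.inl hc.symm))
        have hopt : u[u.length / 2]?.getD ' ' = '1' := by
          rw [List.getElem?_eq_getElem hlt, Option.getD_some]; exact hc
        have hm : ('1' : Char) ∈ u := by simpa [List.contains_iff_mem] using h1
        simp [hopt, hm]
      · have hcontains : u.contains '1' = ((u.take (u.length / 2)).contains '1' ||
            (u.drop (u.length / 2 + 1)).contains '1') := by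
          by_cases hm : '1' ∈ u
          · rcases hsplit.mp hm with h | h | h
            · simp [List.contains_iff_mem, hm, h]
            · exact absurd h.symm hc
            · simp [List.contains_iff_mem, hm, h]
          · have ht : '1' ∉ u.take (u.length / 2) := fun h => hm (List.mem_of_mem_take h)
            have hd : '1' ∉ u.drop (u.length / 2 + 1) := fun h => hm (List.mem_of_mem_drop h)
            simp [List.contains_iff_mem, hm, ht, hd]
        simp only [hgd, Bool.true_and, beq_iff_eq, hc, if_false, Bool.true_or,
          ih (u.take (u.length / 2)) (by simp; omega),
          ih (u.drop (u.length / 2 + 1)) (by simp; omega), hcontains]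
        simp

theorem dfsAux_no_one : ∀ (n : Nat) (u : List Char), u.length ≤ n →
    ∀ (b : Bool), u.contains '1' = false → dfsAux u b = true := by
  intro n
  induction n with
  | zero =>
    intro u hu b h
    have hu0 : u = [] := by cases u <;> simp_all
    subst hu0
    simp [dfsAux]
  | succ n ih =>
    intro u hu b h
    by_cases h0 : u.length = 0
    · have hu0 : u = [] := by cases u <;> simp_all
      subst hu0
      simp [dfsAux]
    · rw [dfsAux, if_neg h0]
      have hgd : u.getD (u.length / 2) ' ' = u[u.length / 2]'(by omega) := by
        rw [List.getD_eq_getElem?_getD, List.getElem?_eq_getElem (by omega)]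
        rfl
      have hmem : ('1' : Char) ∉ u := by simpa [List.contains_iff_mem] using h
      have hc : u[u.length / 2]'(by omega) ≠ '1' := by
        intro hE; exact hmem (hE ▸ List.getElem_mem _)
      rw [hgd, if_neg (by simp [hc])]
      rw [ih (u.take (u.length / 2)) (by simp; omega) _
            (by have ht : ('1' : Char) ∉ u.take (u.length / 2) :=
                  fun hm => hmem (List.mem_of_mem_take hm)
                simpa [List.contains_iff_mem] using ht),
          ih (u.drop (u.length / 2 + 1)) (by simp; omega) _
            (by have hd : ('1' : Char) ∉ u.drop (u.length / 2 + 1) :=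
                  fun hm => hmem (List.mem_of_mem_drop hm)
                simpa [List.contains_iff_mem] using hd)]
      rfl

theorem dfsAux_no_zero : ∀ (n : Nat) (u : List Char), u.length ≤ n →
    u.contains '0' = false → dfsAux u false = true := by
  intro n
  induction n with
  | zero =>
    intro u hu h
    have hu0 : u = [] := by cases u <;> simp_all
    subst hu0
    simp [dfsAux]
  | succ n ih =>
    intro u hu h
    by_cases h0 : u.length = 0
    · have hu0 : u = [] := by cases u <;> simp_all
      subst hu0
      simp [dfsAux]
    · rw [dfsAux, if_neg h0]
      have hgd : u.getD (u.length / 2) ' ' = u[u.length / 2]'(by omega) := by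
        rw [List.getD_eq_getElem?_getD, List.getElem?_eq_getElem (by omega)]
        rfl
      have hmem : ('0' : Char) ∉ u := by simpa [List.contains_iff_mem] using h
      have hc : u[u.length / 2]'(by omega) ≠ '0' := by
        intro hE; exact hmem (hE ▸ List.getElem_mem _)
      rw [hgd, if_neg (by simp)]
      rw [show (false || (u[u.length / 2]'(by omega) == '0')) = false by simp [hc]]
      rw [ih (u.take (u.length / 2)) (by simp; omega)
            (by have ht : ('0' : Char) ∉ u.take (u.length / 2) :=
                  fun hm => hmem (List.mem_of_mem_take hm)
                simpa [List.contains_iff_mem] using ht),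
          ih (u.drop (u.length / 2 + 1)) (by simp; omega)
            (by have hd : ('0' : Char) ∉ u.drop (u.length / 2 + 1) :=
                  fun hm => hmem (List.mem_of_mem_drop hm)
                simpa [List.contains_iff_mem] using hd)]
      rfl

theorem search_eq_dfsAux : ∀ (n : Nat) (u : List Char), u.length ≤ n →
    search u = dfsAux u false := by
  intro n
  induction n with
  | zero =>
    intro u hu
    have hu0 : u = [] := by cases u <;> simp_all
    subst hu0
    simp [search, dfsAux]
  | succ n ih =>
    intro u hu
    by_cases hC : (u.length == 1 || !(u.contains '1') || !(u.contains '0')) = true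
    · rw [search, if_pos hC]
      simp only [Bool.or_eq_true, beq_iff_eq, Bool.not_eq_eq_eq_not, Bool.not_true] at hC
      rcases hC with (hl | h1) | h0
      · obtain ⟨c, hcu⟩ : ∃ c, u = [c] := by
          cases u with
          | nil => simp at hl
          | cons a t =>
            cases t with
            | nil => exact ⟨a, rfl⟩
            | cons b t' => simp at hl
        subst hcu
        simp [dfsAux]
      · exact (dfsAux_no_one u.length u le_rfl false h1).symm
      · exact (dfsAux_no_zero u.length u le_rfl h0).symm
    · have hC' := hC
      simp only [Bool.or_eq_true, beq_iff_eq, Bool.not_eq_eq_eq_not, Bool.not_true, not_or,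
        Bool.not_eq_false] at hC'
      obtain ⟨⟨hl1, h1⟩, h0con⟩ := hC'
      have hne : u ≠ [] := by intro hE; rw [hE] at h1; simp at h1
      have hpos : 0 < u.length := List.length_pos_iff.mpr hne
      have hlen2 : 2 ≤ u.length := by omega
      have hlt : u.length / 2 < u.length := by omega
      have hgd : u.getD (u.length / 2) ' ' = u[u.length / 2] := by
        rw [List.getD_eq_getElem?_getD, List.getElem?_eq_getElem hlt, Option.getD_some]
      rw [search, if_neg hC, dfsAux, if_neg (show ¬u.length = 0 from by omega)]
      simp only [pyGetD_nat, hgd, PySem.List.slice_to_natCast, PySem.List.slice_from_natCast]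
      have htl : (u.take (u.length / 2)).length ≤ n := by rw [List.length_take]; omega
      have hdl : (u.drop (u.length / 2 + 1)).length ≤ n := by rw [List.length_drop]; omega
      by_cases hc0 : u[u.length / 2]'hlt = '0'
      · trans false
        · rw [if_pos (show (u[u.length / 2]'hlt == '0') = true from by simp [hc0])]
        · symm
          rw [if_neg (show ¬(false && (u[u.length / 2]'hlt == '1')) = true from by simp), hc0,
            show (false || (('0' : Char) == '0')) = true from by decide,
            dfsAux_true (u.take (u.length / 2)).length _ le_rfl,
            dfsAux_true (u.drop (u.length / 2 + 1)).length _ le_rfl]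
          have hm : ('1' : Char) ∈ u := by simpa [List.contains_iff_mem] using h1
          rcases (mem_middle_split u (by omega) '1').mp hm with h | h | h
          · have : (u.take (u.length / 2)).contains '1' = true := by
              simpa [List.contains_iff_mem] using h
            rw [this, Bool.not_true, Bool.false_and]
          · exact absurd h.symm (by simp [hc0])
          · have : (u.drop (u.length / 2 + 1)).contains '1' = true := by
              simpa [List.contains_iff_mem] using h
            rw [this, Bool.not_true, Bool.and_false]
      · trans (search (u.take (u.length / 2)) && search (u.drop (u.length / 2 + 1)))
        · rw [if_neg (show ¬(u[u.length / 2]'hlt == '0') = true from by simp [hc0])]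
        · symm
          rw [if_neg (show ¬(false && (u[u.length / 2]'hlt == '1')) = true from by simp),
            show (false || (u[u.length / 2]'hlt == '0')) = false from by simp [hc0],
            ih (u.take (u.length / 2)) htl, ih (u.drop (u.length / 2 + 1)) hdl]

theorem natBin_length : ∀ (k n : Nat), n < 2 ^ k → (natBin n).length ≤ k := by
  intro k
  induction k with
  | zero => intro n h; interval_cases n; simp [natBin]
  | succ k ih =>
    intro n h
    by_cases h0 : n = 0
    · simp [natBin, h0]
    · rw [natBin]
      simp only [h0, if_false, List.length_append, List.length_cons, List.length_nil]
      have h2 : 2 ^ (k + 1) = 2 * 2 ^ k := by ring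
      have := ih (n / 2) (by omega)
      omega

theorem binDigits_pos (n : Nat) : 1 ≤ (binDigits n).length := by
  unfold binDigits
  split
  · simp
  · rw [natBin]; simp_all

theorem binDigits_le (n : Nat) (h : n < 2 ^ 32) : (binDigits n).length ≤ 32 := by
  unfold binDigits
  split
  · simp
  · exact natBin_length 32 n h

theorem pyBin_length (x : Int) (h1 : -2147483648 ≤ x) (h2 : x ≤ 2147483648) :
    1 ≤ (pyBin x).length ∧ (pyBin x).length ≤ 33 := by
  unfold pyBin
  split
  · have hb : (-x).toNat < 2 ^ 32 := by simp [Int.toNat_lt']; omega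
    have := binDigits_le (-x).toNat hb
    simp only [List.length_cons]
    omega
  · have hb : x.toNat < 2 ^ 32 := by
      have : x.toNat ≤ 2147483648 := by omega
      omega
    have := binDigits_le x.toNat hb
    have := binDigits_pos x.toNat
    omega

theorem pad_eq : ∀ (L : Nat), 1 ≤ L → L ≤ 33 → ∀ (s : List Char), s.length = L →
    padScan ((List.range 50).map (fun x => 2 ^ x - 1)) s =
      List.replicate (fullLen 1 s.length - s.length) '0' ++ s := by
  have hbl : (List.range 50).map (fun x => 2 ^ x - 1) =
      0 :: 1 :: 3 :: 7 :: 15 :: 31 :: 63 :: ((List.range' 7 43).map (fun x => 2 ^ x - 1)) := by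
    rw [List.range_eq_range']
    rfl
  intro L h1 h2 s hs
  interval_cases L <;> simp [hbl, padScan, fullLen, hs]

-- ===== VERDICT (by name: the statement is the Claim_ definition above) =====
theorem dfsLoop_nil : dfsLoop [] = true := by
  simp [dfsLoop]

theorem solution_spec : Claim_equal_solution := by
  intro numbers hDom
  unfold Spec_solution
  have hA : solution numbers = (numbers.map (fun x => pyBin x)).map
      (fun number => if search (padScan ((List.range 50).map (fun x => 2 ^ x - 1)) number)
        then (1 : Int) else 0) := by
    unfold solution
    rw [PySem.List.foldl_append_singleton_eq_map]
    simp
  have hB : solution_alt numbers = numbers.map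
      (fun x => if dfsLoop [(List.replicate (fullLen 1 (pyBin x).length - (pyBin x).length) '0'
        ++ pyBin x, false)] then (1 : Int) else 0) := by
    unfold solution_alt
    rw [PySem.List.foldl_append_singleton_eq_map]
    simp
  rw [hA, hB, List.map_map]
  apply List.map_congr_left
  intro x hx
  have hb : pvDomInt x = true := by
    unfold Dom_solution at hDom
    rw [List.all_eq_true] at hDom
    exact hDom x hx
  simp only [pvDomInt, decide_eq_true_eq] at hb
  obtain ⟨hp1, hp33⟩ := pyBin_length x hb.1 hb.2
  simp only [Function.comp_apply]
  rw [pad_eq (pyBin x).length hp1 hp33 (pyBin x) rfl]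
  rw [dfsLoop_cons (List.replicate (fullLen 1 (pyBin x).length - (pyBin x).length) '0'
        ++ pyBin x).length _ le_rfl false [], dfsLoop_nil, Bool.and_true]
  rw [search_eq_dfsAux (List.replicate (fullLen 1 (pyBin x).length - (pyBin x).length) '0'
        ++ pyBin x).length _ le_rfl]
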